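-- pv_equiv track=rewrite | github.com/Priyanshdiwan/Litcoder_CS | M1_L2_Valid_Sudoku.py | is_valid_until
-- ===== SOURCE A (Python) =====
-- def is_valid_until(unit):
--     seen=set()
--     for num in unit:
--         if num!='.':
--             if num in seen:
--                 return False
--             seen.add(num)
--     return True
-- ===== SOURCE B (Python) =====
-- def is_valid_until(unit):
--     nums = sorted(n for n in unit if n != '.')
--     return all(x != y for x, y in zip(nums, nums[1:]))
-- ===== Notes on version B (the rewrite author's own statement) =====
-- stated objective: alternative
-- what changed: Replaces A's incremental seen-set membership loop with early return by sort-then-scan: sort the non-'.' entries and check that no two adjacent sorted entries are equal (duplicates become adjacent after sorting).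
import Mathlib
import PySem

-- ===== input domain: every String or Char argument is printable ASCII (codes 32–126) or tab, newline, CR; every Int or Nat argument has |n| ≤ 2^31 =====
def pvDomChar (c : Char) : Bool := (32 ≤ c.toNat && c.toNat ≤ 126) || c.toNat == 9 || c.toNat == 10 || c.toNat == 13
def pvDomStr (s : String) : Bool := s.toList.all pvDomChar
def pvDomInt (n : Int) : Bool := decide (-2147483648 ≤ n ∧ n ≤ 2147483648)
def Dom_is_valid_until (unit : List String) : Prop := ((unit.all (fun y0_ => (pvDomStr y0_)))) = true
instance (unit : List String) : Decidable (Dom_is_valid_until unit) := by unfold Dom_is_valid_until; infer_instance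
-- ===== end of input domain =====

-- B replaces A's incremental seen-set membership loop (with early return) by sort-then-adjacent-scan:
-- sort the non-'.' entries, then check no two adjacent sorted entries are equal. Same result; different algorithm.

-- ===== PORT A =====
-- the 'for num in unit' loop with its early 'return False', carrying the growing 'seen' set
def isValidUntilLoop (seen : PySem.Set String) : List String → Bool
  | [] => true
  | num :: rest =>
    if num ≠ "." then
      if PySem.Set.contains seen num then false
      else isValidUntilLoop (PySem.Set.add seen num) rest
    else isValidUntilLoop seen rest

def is_valid_until (unit : List String) : Bool :=
  isValidUntilLoop PySem.Set.empty unit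

-- ===== PORT B =====
def is_valid_until_alt (unit : List String) : Bool :=
  let nums := PySem.List.sorted (unit.filter (fun n => n ≠ ".")) (fun x => x) false
  (nums.zip nums.tail).all (fun p => p.1 ≠ p.2)

-- ===== PRECONDITION & SPEC =====
def Spec_is_valid_until (unit : List String) (out : Bool) : Prop := out = is_valid_until_alt unit
instance (unit : List String) (out : Bool) : Decidable (Spec_is_valid_until unit out) := by unfold Spec_is_valid_until; infer_instance

-- ===== CLAIM (what is proved, stated in full; the proofs are below) =====
def Claim_equal_is_valid_until : Prop := ∀ (unit : List String), Dom_is_valid_until unit → Spec_is_valid_until unit (is_valid_until unit)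

-- ===== LEMMAS AND PROOFS =====

-- A's loop returns true iff the non-'.' entries are pairwise distinct and none is already in 'seen'
theorem loop_eq_true_iff (xs : List String) (seen : PySem.Set String) :
    isValidUntilLoop seen xs = true ↔
      (xs.filter (fun n => n ≠ ".")).Nodup ∧ ∀ n ∈ xs.filter (fun n => n ≠ "."), n ∉ seen := by
  induction xs generalizing seen with
  | nil => simp [isValidUntilLoop]
  | cons num rest ih =>
    by_cases hd : num = "."
    · subst hd
      simp only [isValidUntilLoop, List.filter_cons]
      simpa using ih seen
    · simp only [isValidUntilLoop, if_pos hd, List.filter_cons]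
      by_cases hm : num ∈ seen
      · rw [if_pos ((PySem.Set.contains_iff _ _).mpr hm)]
        simp only [decide_eq_true_eq, if_pos hd]
        constructor
        · intro h; exact absurd h (by simp)
        · rintro ⟨-, hall⟩
          exact absurd hm (hall num (by simp [hd]))
      · rw [if_neg (by simp [hm])]
        rw [ih (PySem.Set.add seen num)]
        simp only [decide_eq_true_eq, if_pos hd, List.nodup_cons, List.mem_cons]
        constructor
        · rintro ⟨hnd, hall⟩
          refine ⟨⟨fun hin => ?_, hnd⟩, ?_⟩
          · exact (hall num hin) ((PySem.Set.mem_add seen num num).mpr (Or.inr rfl))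
          · rintro n (rfl | hin)
            · exact hm
            · intro hns
              exact (hall n hin) ((PySem.Set.mem_add seen num n).mpr (Or.inl hns))
        · rintro ⟨⟨hni, hnd⟩, hall⟩
          refine ⟨hnd, fun n hin hns => ?_⟩
          rcases (PySem.Set.mem_add seen num n).mp hns with h | rfl
          · exact hall n (Or.inr hin) h
          · exact hni hin

-- the zip-with-tail scan is exactly adjacency-distinctness (IsChain ≠)
theorem zip_tail_all_ne_iff_chain' (xs : List String) :
    ((xs.zip xs.tail).all (fun p => p.1 ≠ p.2)) = true ↔ List.IsChain (· ≠ ·) xs := by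
  induction xs with
  | nil => simp
  | cons x rest ih =>
    cases rest with
    | nil => simp
    | cons y t =>
      simp only [List.tail_cons, List.zip_cons_cons, List.all_cons, Bool.and_eq_true,
        List.isChain_cons_cons, decide_eq_true_eq]
      exact and_congr Iff.rfl (by simpa using ih)

theorem isChain_and {R S : String → String → Prop} (xs : List String)
    (hr : List.IsChain R xs) (hs : List.IsChain S xs) :
    List.IsChain (fun a b => R a b ∧ S a b) xs := by
  induction xs with
  | nil => exact .nil
  | cons x rest ih =>
    cases rest with
    | nil => exact List.isChain_singleton x
    | cons y t =>
      rw [List.isChain_cons_cons] at hr hs ⊢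
      exact ⟨⟨hr.1, hs.1⟩, ih hr.2 hs.2⟩

-- on a (≤)-sorted list, adjacent distinctness is equivalent to global Nodup
theorem chain'_ne_iff_nodup_of_sorted (xs : List String)
    (hs : xs.Pairwise (· ≤ ·)) : List.IsChain (· ≠ ·) xs ↔ xs.Nodup := by
  constructor
  · intro hc
    have hle : List.IsChain (· ≤ ·) xs := List.isChain_iff_pairwise.mpr hs
    have hlt : List.IsChain (· < ·) xs :=
      (isChain_and xs hle hc).imp_of_mem_imp (fun _ _ _ _ h => lt_of_le_of_ne h.1 h.2)
    exact (List.isChain_iff_pairwise.mp hlt).imp ne_of_lt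
  · intro hnd
    have hlt : xs.Pairwise (· < ·) :=
      (hs.and hnd).imp (fun {a b} h => lt_of_le_of_ne h.1 h.2)
    exact (List.isChain_iff_pairwise.mpr hlt).imp_of_mem_imp (fun _ _ _ _ h => ne_of_lt h)

theorem alt_eq_true_iff (unit : List String) :
    is_valid_until_alt unit = true ↔ (unit.filter (fun n => n ≠ ".")).Nodup := by
  unfold is_valid_until_alt
  rw [zip_tail_all_ne_iff_chain']
  rw [chain'_ne_iff_nodup_of_sorted _ (by simpa using PySem.List.sorted_pairwise (unit.filter (fun n => n ≠ ".")) (fun x => x))]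
  exact (PySem.List.sorted_perm (unit.filter (fun n => n ≠ ".")) (fun x => x) false).nodup_iff

-- ===== VERDICT (by name: the statement is the Claim_ definition above) =====
theorem is_valid_until_spec : Claim_equal_is_valid_until := by
  intro unit _
  unfold Spec_is_valid_until
  rcases hb : is_valid_until_alt unit with _ | _
  · rcases ha : is_valid_until unit with _ | _
    · rfl
    · exfalso
      have := (loop_eq_true_iff unit PySem.Set.empty).mp ha
      exact absurd ((alt_eq_true_iff unit).mpr this.1) (by simp [hb])
  · rcases ha : is_valid_until unit with _ | _
    · exfalso
      have hnd := (alt_eq_true_iff unit).mp hb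
      have : is_valid_until unit = true := by
        apply (loop_eq_true_iff unit PySem.Set.empty).mpr
        exact ⟨hnd, by simp [PySem.Set.empty]⟩
      simp [ha] at this
    · rfl
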